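-- pv_equiv track=rewrite | github.com/tonyH2O/random_problems | aoc/adv_15_1.py | santa
-- ===== SOURCE A (Python) =====
-- def santa(a):
--
--     b = []
--     c = 0
--
--     for x in a:
--         b.append(x)
--
--     for x in b:
--         if x == '(':
--             c +=1
--         elif x == ')':
--             c -=1
--
--         else:
--             return 'error'
--
--
--     return 'Santa currently is on floor: {}'.format(c)
-- ===== SOURCE B (Python) =====
-- def santa(a):
--     chars = list(a)
--     if all(x in '()' for x in chars):
--         return 'Santa currently is on floor: {}'.format(chars.count('(') - chars.count(')'))
--     return 'error'
-- ===== Notes on version B (the rewrite author's own statement) =====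
-- stated objective: idiomatic
-- what changed: B replaces A's copy-then-scan loop with early return by staged library passes: one all() validation pass over the materialized characters, then two count() passes whose difference gives the floor.
import Mathlib
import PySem

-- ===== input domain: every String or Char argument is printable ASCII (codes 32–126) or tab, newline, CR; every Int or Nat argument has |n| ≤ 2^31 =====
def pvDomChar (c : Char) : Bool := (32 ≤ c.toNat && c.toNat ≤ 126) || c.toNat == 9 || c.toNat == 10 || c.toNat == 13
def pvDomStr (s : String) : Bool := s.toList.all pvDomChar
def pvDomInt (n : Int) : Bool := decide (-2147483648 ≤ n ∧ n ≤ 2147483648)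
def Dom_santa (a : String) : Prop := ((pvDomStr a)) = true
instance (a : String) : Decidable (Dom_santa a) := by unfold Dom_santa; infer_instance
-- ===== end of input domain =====

-- B replaces A's single copy-then-scan loop with early return by staged library passes
-- (an all() validation pass, then two count() passes whose difference is the floor); objective: idiomatic.

-- ===== PORT A =====
-- second loop of A: early return 'error' on a non-paren char, else accumulate c
def santaLoop : List Char → Int → String
  | [], c => "Santa currently is on floor: " ++ PySem.Int.toStr c
  | x :: xs, c =>
    if x = '(' then santaLoop xs (c + 1)
    else if x = ')' then santaLoop xs (c - 1)
    else "error"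

def santa (a : String) : String :=
  -- first loop: b = []; for x in a: b.append(x)
  let b : List Char := a.toList.foldl (fun acc x => acc ++ [x]) []
  santaLoop b 0

-- ===== PORT B =====
def santa_alt (a : String) : String :=
  let chars : List Char := a.toList
  if chars.all (fun x => "()".toList.contains x) then
    "Santa currently is on floor: " ++
      PySem.Int.toStr ((PySem.List.count chars '(' : Int) - (PySem.List.count chars ')' : Int))
  else "error"

-- ===== PRECONDITION & SPEC =====
def Spec_santa (a : String) (out : String) : Prop := out = santa_alt a
instance (a : String) (out : String) : Decidable (Spec_santa a out) := by unfold Spec_santa; infer_instance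

-- ===== CLAIM =====
def Claim_equal_santa : Prop := ∀ (a : String), Dom_santa a → Spec_santa a (santa a)

-- ===== LEMMAS AND PROOFS =====

theorem santa_copy_eq (xs : List Char) : xs.foldl (fun acc x => acc ++ [x]) [] = xs := by
  have h : ∀ (xs acc : List Char), xs.foldl (fun acc x => acc ++ [x]) acc = acc ++ xs := by
    intro xs
    induction xs with
    | nil => simp
    | cons x xs ih => intro acc; simp [List.foldl, ih]
  simpa using h xs []

theorem santa_key (xs : List Char) (c : Int) :
    santaLoop xs c =
      (if xs.all (fun x => "()".toList.contains x) then
        "Santa currently is on floor: " ++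
          PySem.Int.toStr (c + (PySem.List.count xs '(' : Int) - (PySem.List.count xs ')' : Int))
      else "error") := by
  induction xs generalizing c with
  | nil => simp [santaLoop, PySem.List.count]
  | cons x xs ih =>
    simp only [santaLoop]
    by_cases h1 : x = '('
    · subst h1
      rw [ih (c + 1)]
      simp [PySem.List.count]
      split_ifs with hall
      · congr 1
        ring_nf
      · rfl
    · by_cases h2 : x = ')'
      · subst h2
        rw [if_neg h1, if_pos rfl, ih (c - 1)]
        simp [PySem.List.count, h1]
        split_ifs with hall
        · congr 1
          ring_nf
        · rfl
      · rw [if_neg h1, if_neg h2]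
        have : ¬ (x :: xs).all (fun x => "()".toList.contains x) := by
          simp [List.all_cons]
          intro hc
          rcases hc with h | h <;> simp_all
        rw [if_neg this]

-- ===== VERDICT =====
theorem santa_spec : Claim_equal_santa := by
  intro a _
  unfold Spec_santa santa santa_alt
  rw [santa_copy_eq, santa_key a.toList 0]
  simp
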